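-- pv_equiv track=rewrite | github.com/Readm/quant | experts/specialists/expert1a_trend.py | _debounce_signals
-- ===== SOURCE A (Python) =====
-- def _debounce_signals(signals, min_consecutive=2, cooldown_days=3):
--     """
--     信号去抖：解决日频翻牌问题
--     - min_consecutive: 信号需连续出现 N 天才确认
--     - cooldown_days: 平仓后等待 N 天才能重新开仓
--     """
--     n = len(signals)
--     # Step 1: 连续 N 天确认
--     confirmed = [0] * n
--     streak = 0; pending = 0
--     for i in range(n):
--         if signals[i] == pending:
--             streak += 1
--         else:
--             streak = 1; pending = signals[i]
--         if streak >= min_consecutive and pending != 0: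
--             confirmed[i] = pending; streak = 0
--     # Step 2: 冷却期
--     cooldown = 0; result = [0] * n; pos_open = False
--     for i in range(n):
--         if cooldown > 0:
--             cooldown -= 1
--             if confirmed[i] == -1 and pos_open:
--                 pos_open = False  # 冷却期内仍允许平仓
--             result[i] = 0
--         elif confirmed[i] == 1 and not pos_open:
--             result[i] = 1; pos_open = True
--         elif confirmed[i] == -1 and pos_open:
--             result[i] = -1; pos_open = False; cooldown = cooldown_days
--         else:
--             result[i] = 0
--     return result
-- ===== SOURCE B (Python) =====
-- def _debounce_signals(signals, min_consecutive=2, cooldown_days=3):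
--     # Run-length decomposition: a confirmation fires exactly at the positions
--     # inside each maximal run of a nonzero value whose 1-based offset is a
--     # multiple of m = max(min_consecutive, 1); apply the cooldown state
--     # machine to those run positions directly, no streak counter and no
--     # intermediate confirmed array.
--     m = min_consecutive if min_consecutive > 1 else 1
--     n = len(signals)
--     result = []
--     cooldown = 0
--     pos_open = False
--     i = 0
--     while i < n:
--         v = signals[i]
--         j = i
--         while j < n and signals[j] == v:
--             j += 1
--         for k in range(1, j - i + 1):
--             c = v if (v != 0 and k % m == 0) else 0
--             if cooldown > 0:
--                 cooldown -= 1
--                 if c == -1 and pos_open: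
--                     pos_open = False
--                 result.append(0)
--             elif c == 1 and not pos_open:
--                 result.append(1)
--                 pos_open = True
--             elif c == -1 and pos_open:
--                 result.append(-1)
--                 pos_open = False
--                 cooldown = cooldown_days
--             else:
--                 result.append(0)
--         i = j
--     return result
-- ===== Notes on version B (the rewrite author's own statement) =====
-- stated objective: alternative
-- what changed: B replaces A's per-element streak counter and intermediate confirmed array by a run-length decomposition: it peels maximal runs of equal signal values and confirms exactly at run offsets divisible by max(min_consecutive, 1), feeding those confirmations straight into the cooldown state machine.
import Mathlib
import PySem

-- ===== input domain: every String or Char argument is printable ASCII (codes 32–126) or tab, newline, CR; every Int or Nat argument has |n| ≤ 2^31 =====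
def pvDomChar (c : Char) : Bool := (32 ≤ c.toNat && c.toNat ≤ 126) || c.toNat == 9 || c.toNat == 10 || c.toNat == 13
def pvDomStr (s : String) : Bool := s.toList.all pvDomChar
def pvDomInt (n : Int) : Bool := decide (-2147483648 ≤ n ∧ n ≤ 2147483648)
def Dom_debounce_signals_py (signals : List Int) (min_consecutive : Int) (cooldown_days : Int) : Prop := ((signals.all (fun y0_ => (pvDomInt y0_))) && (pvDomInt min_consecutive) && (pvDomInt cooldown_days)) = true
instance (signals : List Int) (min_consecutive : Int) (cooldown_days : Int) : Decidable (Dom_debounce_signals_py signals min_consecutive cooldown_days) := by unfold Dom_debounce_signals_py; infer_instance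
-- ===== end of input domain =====

-- B replaces A's streak-counter + intermediate confirmed array by a run-length decomposition:
-- confirmations fire at run offsets divisible by max(min_consecutive, 1) (alternative algorithm; same values).


-- ===== PORT A =====
-- Step 1 of A: the confirmation loop, producing the confirmed array.
def pvConfirmLoop (signals : List Int) (streak pending min_consecutive : Int) : List Int :=
  match signals with
  | [] => []
  | s :: rest =>
    let streak' : Int := if s == pending then streak + 1 else 1
    let pending' : Int := if s == pending then pending else s
    if streak' ≥ min_consecutive ∧ pending' ≠ 0 then
      pending' :: pvConfirmLoop rest 0 pending' min_consecutive
    else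
      0 :: pvConfirmLoop rest streak' pending' min_consecutive

-- Step 2 of A: the cooldown loop over the confirmed array.
def pvCooldownLoop (confirmed : List Int) (cooldown : Int) (pos_open : Bool) (cooldown_days : Int) : List Int :=
  match confirmed with
  | [] => []
  | c :: rest =>
    if cooldown > 0 then
      let pos_open' := if c == -1 ∧ pos_open then false else pos_open
      0 :: pvCooldownLoop rest (cooldown - 1) pos_open' cooldown_days
    else if c == 1 ∧ ¬ pos_open then
      1 :: pvCooldownLoop rest cooldown true cooldown_days
    else if c == -1 ∧ pos_open then
      (-1) :: pvCooldownLoop rest cooldown_days false cooldown_days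
    else
      0 :: pvCooldownLoop rest cooldown pos_open cooldown_days

def debounce_signals_py (signals : List Int) (min_consecutive : Int) (cooldown_days : Int) : List Int :=
  pvCooldownLoop (pvConfirmLoop signals 0 0 min_consecutive) 0 false cooldown_days

-- ===== PORT B =====
-- Inner `while j < n and signals[j] == v` of B: length of the leading run of v, and the remainder.
def pvTakeRun (l : List Int) (v : Int) : Nat × List Int :=
  match l with
  | [] => (0, [])
  | s :: rest =>
    if s = v then
      let t := pvTakeRun rest v
      (t.1 + 1, t.2)
    else
      (0, s :: rest)

-- Needed by pvRunsLoop's termination proof (cited in its decreasing_by).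
theorem pvTakeRun_len_le (l : List Int) (v : Int) : (pvTakeRun l v).2.length ≤ l.length := by
  induction l with
  | nil => simp [pvTakeRun]
  | cons s rest ih =>
    simp only [pvTakeRun]
    split
    · simp; omega
    · simp

-- `for k in range(1, j - i + 1)` body of B: emit one result element per run position,
-- returning the emitted elements together with the final (cooldown, pos_open) state.
def pvRunLoop (v m cd : Int) : Nat → Nat → Int → Bool → List Int × Int × Bool
  | 0, _, cooldown, pos_open => ([], cooldown, pos_open)
  | r + 1, k, cooldown, pos_open =>
    let c : Int := if v ≠ 0 ∧ PySem.Int.mod (k : Int) m = 0 then v else 0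
    if cooldown > 0 then
      let res := pvRunLoop v m cd r (k + 1) (cooldown - 1) (if c = -1 ∧ pos_open = true then false else pos_open)
      (0 :: res.1, res.2)
    else if c = 1 ∧ pos_open = false then
      let res := pvRunLoop v m cd r (k + 1) cooldown true
      (1 :: res.1, res.2)
    else if c = -1 ∧ pos_open = true then
      let res := pvRunLoop v m cd r (k + 1) cd false
      ((-1) :: res.1, res.2)
    else
      let res := pvRunLoop v m cd r (k + 1) cooldown pos_open
      (0 :: res.1, res.2)

-- Outer `while i < n` of B: peel one maximal run at a time.
def pvRunsLoop (m cd : Int) : List Int → Int → Bool → List Int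
  | [], _, _ => []
  | s :: rest, cooldown, pos_open =>
    let t := pvTakeRun rest s
    let res := pvRunLoop s m cd (t.1 + 1) 1 cooldown pos_open
    res.1 ++ pvRunsLoop m cd t.2 res.2.1 res.2.2
  termination_by l => l.length
  decreasing_by
    have := pvTakeRun_len_le rest s
    simp only [List.length_cons]; omega

def debounce_signals_py_alt (signals : List Int) (min_consecutive : Int) (cooldown_days : Int) : List Int :=
  pvRunsLoop (if min_consecutive > 1 then min_consecutive else 1) cooldown_days signals 0 false

-- ===== PRECONDITION & SPEC =====
def Spec_debounce_signals_py (signals : List Int) (min_consecutive : Int) (cooldown_days : Int) (out : List Int) : Prop := out = debounce_signals_py_alt signals min_consecutive cooldown_days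
instance (signals : List Int) (min_consecutive : Int) (cooldown_days : Int) (out : List Int) : Decidable (Spec_debounce_signals_py signals min_consecutive cooldown_days out) := by unfold Spec_debounce_signals_py; infer_instance

-- ===== CLAIM (what is proved, stated in full; the proofs are below) =====
def Claim_equal_debounce_signals_py : Prop := ∀ (signals : List Int) (min_consecutive : Int) (cooldown_days : Int), Dom_debounce_signals_py signals min_consecutive cooldown_days → Spec_debounce_signals_py signals min_consecutive cooldown_days (debounce_signals_py signals min_consecutive cooldown_days)

-- ===== LEMMAS AND PROOFS =====

-- Decomposition produced by pvTakeRun: the input is the run followed by a remainder not starting with v.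
theorem pvTakeRun_decomp (l : List Int) (v : Int) :
    l = List.replicate (pvTakeRun l v).1 v ++ (pvTakeRun l v).2 ∧
    (∀ h, ((pvTakeRun l v).2).head? = some h → h ≠ v) := by
  induction l with
  | nil => simp [pvTakeRun]
  | cons s rest ih =>
    simp only [pvTakeRun]
    by_cases hs : s = v
    · simp only [if_pos hs, List.replicate_succ]
      exact ⟨by simpa [hs] using ih.1, ih.2⟩
    · simp only [if_neg hs]
      exact ⟨rfl, by intro h hh; simp at hh; rw [← hh]; exact hs⟩

-- Successor-mod bookkeeping for the streak invariant.
theorem pvSuccMod (mN k : Nat) (h : 1 ≤ mN) :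
    ((k + 1) % mN = 0 ↔ k % mN = mN - 1) ∧ ((k + 1) % mN ≠ 0 → (k + 1) % mN = k % mN + 1) := by
  have hlt : k % mN < mN := Nat.mod_lt _ h
  have hadd : (k % mN + 1) % mN = (k + 1) % mN := Nat.mod_add_mod k mN 1
  rcases Nat.lt_or_ge (k % mN + 1) mN with hc | hc
  · have : (k + 1) % mN = k % mN + 1 := by rw [← hadd, Nat.mod_eq_of_lt hc]
    constructor
    · omega
    · intro _; omega
  · have hk : k % mN + 1 = mN := by omega
    have : (k + 1) % mN = 0 := by rw [← hadd, hk, Nat.mod_self]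
    constructor
    · omega
    · intro hne; omega

-- A's confirmation test "streak + 1 ≥ mc" at run offset k + 1 is B's divisibility test.
theorem pvConfirmIff (mc m : Int) (hm : m = if mc > 1 then mc else 1) (k : Nat) :
    (((k % m.toNat : Nat) : Int) + 1 ≥ mc) ↔ (k + 1) % m.toNat = 0 := by
  by_cases h1 : mc > 1
  · have hmm : m = mc := by rw [hm, if_pos h1]
    have hN : m.toNat = mc.toNat := by rw [hmm]
    have hge : 1 ≤ m.toNat := by rw [hN]; omega
    have hcast : (m.toNat : Int) = mc := by rw [hN]; omega
    have hlt : k % m.toNat < m.toNat := Nat.mod_lt _ hge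
    have hmod := pvSuccMod m.toNat k hge
    constructor
    · intro hk
      exact hmod.1.mpr (by omega)
    · intro hk
      have := hmod.1.mp hk
      omega
  · have hmm : m = 1 := by rw [hm, if_neg h1]
    have : m.toNat = 1 := by rw [hmm]; rfl
    simp [this]; omega

-- The PySem mod test in B, for positive modulus, is Nat divisibility of the offset.
theorem pvModTest (m : Int) (hpos : 0 < m) (k : Nat) :
    (PySem.Int.mod (k : Int) m = 0) ↔ k % m.toNat = 0 := by
  rw [PySem.Int.mod_eq_emod_of_pos hpos]
  have hc : (m.toNat : Int) = m := Int.toNat_of_nonneg (le_of_lt hpos)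
  rw [← hc]
  constructor
  · intro h
    have : ((k % m.toNat : Nat) : Int) = 0 := by push_cast; exact h
    exact_mod_cast this
  · intro h
    have : ((k % m.toNat : Nat) : Int) = ((0 : Nat) : Int) := by exact_mod_cast congrArg (fun x : Nat => (x : Int)) h
    push_cast at this
    exact this

-- Fusion of the run with A's two loops: processing `r` more elements of a run of `v`
-- (offsets k+1, k+2, …), with A's streak ≡ k mod m on nonzero runs.
theorem pvRunEq (mc m cd : Int) (hm : m = if mc > 1 then mc else 1) (v : Int) (rest' : List Int)
    (hcont : ∀ (streak cooldown : Int) (pos_open : Bool),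
      pvRunsLoop m cd rest' cooldown pos_open
        = pvCooldownLoop (pvConfirmLoop rest' streak v mc) cooldown pos_open cd) :
    ∀ (r k : Nat) (st cooldown : Int) (pos_open : Bool),
      (v ≠ 0 → st = ((k % m.toNat : Nat) : Int)) →
      pvCooldownLoop (pvConfirmLoop (List.replicate r v ++ rest') st v mc) cooldown pos_open cd
        = (pvRunLoop v m cd r (k + 1) cooldown pos_open).1
          ++ pvRunsLoop m cd rest' (pvRunLoop v m cd r (k + 1) cooldown pos_open).2.1
              (pvRunLoop v m cd r (k + 1) cooldown pos_open).2.2 := by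
  have hm1 : (1 : Int) ≤ m := by rw [hm]; split_ifs <;> omega
  have hmN : 1 ≤ m.toNat := by omega
  intro r
  induction r with
  | zero =>
    intro k st cooldown pos_open hst
    simp only [List.replicate, List.nil_append, pvRunLoop]
    exact (hcont st cooldown pos_open).symm
  | succ r ih =>
    intro k st cooldown pos_open hst
    rw [List.replicate_succ, List.cons_append]
    have hmodt := pvModTest m (by omega) (k + 1)
    have hcond : (st + 1 ≥ mc ∧ v ≠ 0) ↔ (v ≠ 0 ∧ PySem.Int.mod ((k + 1 : Nat) : Int) m = 0) := by
      constructor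
      · rintro ⟨h1, h2⟩
        rw [hst h2] at h1
        exact ⟨h2, hmodt.mpr ((pvConfirmIff mc m hm k).mp h1)⟩
      · rintro ⟨h2, h1⟩
        refine ⟨?_, h2⟩
        rw [hst h2]
        exact (pvConfirmIff mc m hm k).mpr (hmodt.mp h1)
    simp only [pvConfirmLoop, pvRunLoop, beq_self_eq_true, if_true]
    by_cases hC : v ≠ 0 ∧ PySem.Int.mod ((k + 1 : Nat) : Int) m = 0
    · rw [if_pos (hcond.mpr hC), if_pos hC]
      have hk1 : (k + 1) % m.toNat = 0 := hmodt.mp hC.2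
      have hst' : v ≠ 0 → (0 : Int) = (((k + 1) % m.toNat : Nat) : Int) := by
        intro _; rw [hk1]; rfl
      simp only [pvCooldownLoop, beq_iff_eq, Bool.not_eq_true]
      split_ifs <;>
        (simp only [List.cons_append]; exact congrArg _ (ih (k + 1) _ _ _ hst'))
    · rw [if_neg (fun hc => hC (hcond.mp hc)), if_neg hC]
      have hst' : v ≠ 0 → st + 1 = (((k + 1) % m.toNat : Nat) : Int) := by
        intro hv
        have hne : (k + 1) % m.toNat ≠ 0 := fun he => hC ⟨hv, hmodt.mpr he⟩
        have hsucc := (pvSuccMod m.toNat k hmN).2 hne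
        rw [hst hv, hsucc]
        push_cast
        ring
      simp only [pvCooldownLoop, beq_iff_eq, Bool.not_eq_true]
      split_ifs <;>
        (simp only [List.cons_append]; exact congrArg _ (ih (k + 1) _ _ _ hst'))

-- Main equivalence, by strong induction on the length of the signal list.
theorem pvMainEq (mc m cd : Int) (hm : m = if mc > 1 then mc else 1) :
    ∀ (n : Nat) (sig : List Int), sig.length ≤ n →
    ∀ (streak pending cooldown : Int) (pos_open : Bool),
      (∀ h, sig.head? = some h → h = pending → streak = 0) →
      pvRunsLoop m cd sig cooldown pos_open
        = pvCooldownLoop (pvConfirmLoop sig streak pending mc) cooldown pos_open cd := by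
  intro n
  induction n with
  | zero =>
    intro sig hlen streak pending cooldown pos_open _
    have hnil : sig = [] := List.length_eq_zero_iff.mp (Nat.le_zero.mp hlen)
    subst hnil
    simp [pvRunsLoop, pvConfirmLoop, pvCooldownLoop]
  | succ n ih =>
    intro sig hlen streak pending cooldown pos_open hhead
    cases sig with
    | nil => simp [pvRunsLoop, pvConfirmLoop, pvCooldownLoop]
    | cons s rest =>
      obtain ⟨hdec, hhd⟩ := pvTakeRun_decomp rest s
      have hlenr : rest.length ≤ n := by
        simp only [List.length_cons] at hlen; omega
      have hlen2 : (pvTakeRun rest s).2.length ≤ n :=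
        le_trans (pvTakeRun_len_le rest s) hlenr
      have hcont : ∀ (streak cooldown : Int) (pos_open : Bool),
          pvRunsLoop m cd (pvTakeRun rest s).2 cooldown pos_open
            = pvCooldownLoop (pvConfirmLoop (pvTakeRun rest s).2 streak s mc) cooldown pos_open cd :=
        fun st co po => ih _ hlen2 st s co po (fun h hh heq => absurd heq (hhd h hh))
      have hstreak1 : (if s == pending then streak + 1 else (1 : Int)) = 1 := by
        by_cases hsp : s = pending
        · have h0 := hhead s rfl hsp
          simp [hsp, h0]
        · simp [hsp]
      have hpend : (if s == pending then pending else s) = s := by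
        by_cases hsp : s = pending
        · simp [hsp]
        · simp [hsp]
      have hA : pvConfirmLoop (s :: rest) streak pending mc
          = pvConfirmLoop (List.replicate ((pvTakeRun rest s).1 + 1) s ++ (pvTakeRun rest s).2) 0 s mc := by
        rw [List.replicate_succ, List.cons_append, ← hdec]
        simp only [pvConfirmLoop]
        rw [hstreak1, hpend]
        simp
      rw [hA]
      have hrun := pvRunEq mc m cd hm s (pvTakeRun rest s).2 hcont
        ((pvTakeRun rest s).1 + 1) 0 0 cooldown pos_open (by intro _; simp)
      simp only [Nat.zero_add] at hrun
      rw [hrun]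
      simp only [pvRunsLoop]

-- ===== VERDICT (by name: the statement is the Claim_ definition above) =====
theorem debounce_signals_py_spec : Claim_equal_debounce_signals_py := by
  intro signals mc cd _
  unfold Spec_debounce_signals_py debounce_signals_py debounce_signals_py_alt
  exact (pvMainEq mc _ cd rfl signals.length signals le_rfl 0 0 0 false
    (by intro h _ _; rfl)).symm
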